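-- pv_equiv track=rewrite | github.com/Lalith3470/GeeksforGeeks | Reversing the equation.py | reverseEqn
-- ===== SOURCE A (Python) =====
-- def reverseEqn(s):
--     # code here
--     lst=[]
--     c=''
--     for i in s:
--         if i.isnumeric():
--             c+=i
--         else:
--             if c:
--                 lst.append(c)
--                 c=''
--             lst.append(i)
--     if c:lst.append(c)
--     return ''.join(lst[::-1])
-- ===== SOURCE B (Python) =====
-- def reverseEqn(s):
--     # Reverse the whole string, then re-reverse each maximal numeric run
--     # to restore digit order inside numbers.
--     r = s[::-1]
--     out = []
--     i = 0
--     n = len(r)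
--     while i < n:
--         if r[i].isnumeric():
--             j = i
--             while j < n and r[j].isnumeric():
--                 j += 1
--             out.append(r[i:j][::-1])
--             i = j
--         else:
--             out.append(r[i])
--             i += 1
--     return ''.join(out)
-- ===== Notes on version B (the rewrite author's own statement) =====
-- stated objective: alternative
-- what changed: Instead of A's single-pass accumulator state machine that collects tokens and joins them reversed, B reverses the whole string first and then re-reverses each maximal numeric run in one scan to restore digit order.
import Mathlib
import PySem

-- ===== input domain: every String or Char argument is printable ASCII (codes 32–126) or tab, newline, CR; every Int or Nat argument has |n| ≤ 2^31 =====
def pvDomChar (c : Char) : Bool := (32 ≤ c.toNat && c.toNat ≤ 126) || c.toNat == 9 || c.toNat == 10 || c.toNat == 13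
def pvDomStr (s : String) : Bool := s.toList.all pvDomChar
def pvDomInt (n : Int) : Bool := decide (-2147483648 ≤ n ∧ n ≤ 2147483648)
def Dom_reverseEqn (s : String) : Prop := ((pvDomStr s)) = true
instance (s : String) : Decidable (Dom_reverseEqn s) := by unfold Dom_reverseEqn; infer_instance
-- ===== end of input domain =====

-- B reverses the whole string and then re-reverses each maximal numeric run,
-- instead of A's accumulator state machine; objective: alternative (same cost).

-- `str.isnumeric` restricted to the ASCII domain: exactly the digits '0'-'9'.
def pvIsNum (c : Char) : Bool := c.isDigit

-- ===== PORT A =====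
-- One step of A's for-loop; state = (lst, c) with tokens kept as List Char.
def reverseEqnStep (st : List (List Char) × List Char) (i : Char) :
    List (List Char) × List Char :=
  if pvIsNum i then (st.1, st.2 ++ [i])
  else
    let lst := if st.2 ≠ [] then st.1 ++ [st.2] else st.1
    (lst ++ [[i]], [])

-- 'if c: lst.append(c)' after the loop
def reverseEqnFin (st : List (List Char) × List Char) : List (List Char) :=
  if st.2 ≠ [] then st.1 ++ [st.2] else st.1

def reverseEqn (s : String) : String :=
  String.mk (reverseEqnFin (s.toList.foldl reverseEqnStep ([], []))).reverse.flatten    -- ''.join(lst[::-1])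

-- ===== PORT B =====
-- B's scan over the reversed string: a numeric run is emitted reversed,
-- any other character is emitted as is (takeWhile/dropWhile = Source B's j-scan).
def reverseEqnGo : List Char → List Char
  | [] => []
  | c :: rest =>
    if h : pvIsNum c then
      ((c :: rest).takeWhile pvIsNum).reverse ++
        reverseEqnGo ((c :: rest).dropWhile pvIsNum)
    else c :: reverseEqnGo rest
termination_by l => l.length
decreasing_by
  · simp only [List.dropWhile, h]
    have := List.length_dropWhile_le pvIsNum rest
    simp; omega
  · simp

def reverseEqn_alt (s : String) : String :=
  String.mk (reverseEqnGo s.toList.reverse)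

-- ===== PRECONDITION & SPEC =====
def Spec_reverseEqn (s : String) (out : String) : Prop := out = reverseEqn_alt s
instance (s : String) (out : String) : Decidable (Spec_reverseEqn s out) := by unfold Spec_reverseEqn; infer_instance

-- ===== CLAIM (what is proved, stated in full; the proofs are below) =====
def Claim_equal_reverseEqn : Prop := ∀ (s : String), Dom_reverseEqn s → Spec_reverseEqn s (reverseEqn s)

-- ===== LEMMAS AND PROOFS =====

-- Canonical tokenization of a char list into maximal numeric runs / single chars.
def tok : List Char → List (List Char)
  | [] => []
  | x :: xs =>
    if pvIsNum x then (x :: xs.takeWhile pvIsNum) :: tok (xs.dropWhile pvIsNum)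
    else [x] :: tok xs
termination_by l => l.length
decreasing_by
  · have := List.length_dropWhile_le pvIsNum xs
    simp; omega
  · simp

theorem tok_nil : tok [] = [] := by rw [tok.eq_def]

theorem tok_cons (x : Char) (xs : List Char) :
    tok (x :: xs) =
      if pvIsNum x then (x :: xs.takeWhile pvIsNum) :: tok (xs.dropWhile pvIsNum)
      else [x] :: tok xs := by
  rw [tok.eq_def]

theorem go_nil : reverseEqnGo [] = [] := by rw [reverseEqnGo.eq_def]

theorem go_cons (c : Char) (rest : List Char) :
    reverseEqnGo (c :: rest) =
      if pvIsNum c then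
        ((c :: rest).takeWhile pvIsNum).reverse ++
          reverseEqnGo ((c :: rest).dropWhile pvIsNum)
      else c :: reverseEqnGo rest := by
  rw [reverseEqnGo.eq_def]
  by_cases h : pvIsNum c = true <;> simp [h]

-- A's fold with pending-digits accumulator, unrolled.
def tokC : List Char → List Char → List (List Char)
  | c, [] => if c ≠ [] then [c] else []
  | c, x :: xs =>
    if pvIsNum x then tokC (c ++ [x]) xs
    else (if c ≠ [] then [c] else []) ++ [x] :: tokC [] xs

theorem foldl_step_tokC (xs : List Char) (lst : List (List Char)) (c : List Char) :
    reverseEqnFin (xs.foldl reverseEqnStep (lst, c)) = lst ++ tokC c xs := by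
  induction xs generalizing lst c with
  | nil => simp [tokC, reverseEqnFin]; split_ifs <;> simp
  | cons x xs ih =>
    simp only [List.foldl_cons, reverseEqnStep, tokC]
    split_ifs with h hc
    · exact ih lst (c ++ [x])
    · rw [ih]; simp
    · rw [ih]; simp

theorem tokC_spec (xs : List Char) :
    (∀ c, c ≠ [] →
      tokC c xs = (c ++ xs.takeWhile pvIsNum) :: tok (xs.dropWhile pvIsNum)) ∧
    tokC [] xs = tok xs := by
  induction xs with
  | nil => exact ⟨fun c hc => by simp [tokC, tok_nil, hc], by simp [tokC, tok_nil]⟩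
  | cons x xs ih =>
    constructor
    · intro c hc
      simp only [tokC, List.takeWhile_cons, List.dropWhile_cons]
      split_ifs with h
      · rw [ih.1 (c ++ [x]) (by simp)]; simp
      · rw [ih.2, tok_cons, if_neg h]; simp
    · have e : (if ([] : List Char) ≠ [] then [([] : List Char)] else []) = [] := by simp
      simp only [tokC, e, List.nil_append]
      split_ifs with h
      · rw [ih.1 [x] (by simp), tok_cons, if_pos h]; simp
      · rw [ih.2, tok_cons, if_neg h]

theorem reverseEqn_tok (s : String) :
    reverseEqn s = String.mk (tok s.toList).reverse.flatten := by
  unfold reverseEqn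
  rw [foldl_step_tokC s.toList [] [], (tokC_spec s.toList).2]
  simp

-- head of zs is not numeric (vacuously true for [])
def noNumHead : List Char → Prop
  | [] => True
  | c :: _ => pvIsNum c = false

theorem takeWhile_append_noNum (ys zs : List Char) (h : noNumHead zs) :
    (ys ++ zs).takeWhile pvIsNum = ys.takeWhile pvIsNum := by
  induction ys with
  | nil => cases zs with
    | nil => rfl
    | cons z zs => simp only [noNumHead] at h; simp [h]
  | cons y ys ih => simp only [List.cons_append, List.takeWhile_cons]; split <;> simp [ih]
theorem dropWhile_append_noNum (ys zs : List Char) (h : noNumHead zs) :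
    (ys ++ zs).dropWhile pvIsNum = ys.dropWhile pvIsNum ++ zs := by
  induction ys with
  | nil => cases zs with
    | nil => rfl
    | cons z zs => simp only [noNumHead] at h; simp [h]
  | cons y ys ih => simp only [List.cons_append, List.dropWhile_cons]; split <;> simp [ih]

theorem tok_append (ys zs : List Char) (h : noNumHead zs) :
    tok (ys ++ zs) = tok ys ++ tok zs := by
  induction ys using tok.induct with
  | case1 => simp [tok_nil]
  | case2 x xs hx ih =>
    rw [List.cons_append, tok_cons, tok_cons, if_pos hx, if_pos hx,
        takeWhile_append_noNum xs zs h, dropWhile_append_noNum xs zs h, ih]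
    simp
  | case3 x xs hx ih =>
    rw [List.cons_append, tok_cons, tok_cons, if_neg hx, if_neg hx, ih]
    simp

theorem tok_allNum (z : List Char) (hne : z ≠ []) (hall : ∀ c ∈ z, pvIsNum c = true) :
    tok z = [z] := by
  cases z with
  | nil => exact absurd rfl hne
  | cons x xs =>
    rw [tok_cons, if_pos (hall x (by simp))]
    rw [List.takeWhile_eq_self_iff.mpr (fun c hc => hall c (by simp [hc])),
        List.dropWhile_eq_nil_iff.mpr (fun c hc => by simp [hall c (by simp [hc])]), tok_nil]

theorem head_dropWhile_noNum (xs : List Char) : noNumHead (xs.dropWhile pvIsNum) := by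
  induction xs with
  | nil => trivial
  | cons x xs ih =>
    rw [List.dropWhile_cons]
    by_cases h : pvIsNum x = true
    · simpa [h] using ih
    · simp only [h]
      simpa [noNumHead] using h

theorem tok_prefix_num (d z : List Char) (hd : noNumHead d) (hne : z ≠ [])
    (hall : ∀ c ∈ z, pvIsNum c = true) :
    tok (d.reverse ++ z) = tok d.reverse ++ [z] := by
  cases d with
  | nil => simpa [tok_nil] using tok_allNum z hne hall
  | cons y d' =>
    simp only [noNumHead] at hd
    have h1 : noNumHead (y :: z) := hd
    rw [List.reverse_cons, List.append_assoc, List.singleton_append,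
        tok_append d'.reverse (y :: z) h1, tok_append d'.reverse [y] (by simpa [noNumHead])]
    rw [tok_cons, if_neg (by simp [hd]), tok_allNum z hne hall]
    simp [tok_cons, hd, tok_nil]

theorem tok_reverse (l : List Char) :
    tok l.reverse = ((tok l).map List.reverse).reverse := by
  induction l using tok.induct with
  | case1 => simp [tok_nil]
  | case2 x xs hx ih =>
    obtain ⟨t, ht⟩ : ∃ t, xs.takeWhile pvIsNum = t := ⟨_, rfl⟩
    obtain ⟨d, hd⟩ : ∃ d, xs.dropWhile pvIsNum = d := ⟨_, rfl⟩
    have hsplit : xs = t ++ d := by rw [← ht, ← hd, List.takeWhile_append_dropWhile]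
    have hall : ∀ c ∈ t.reverse ++ [x], pvIsNum c = true := by
      intro c hc
      rcases List.mem_append.mp hc with hc | hc
      · exact List.mem_takeWhile_imp (ht ▸ List.mem_reverse.mp hc)
      · simp only [List.mem_singleton] at hc; subst hc; exact hx
    rw [hd] at ih
    have lhs1 : tok (x :: xs).reverse = tok (d.reverse ++ (t.reverse ++ [x])) := by
      rw [List.reverse_cons, hsplit]
      simp [List.reverse_append]
    rw [lhs1, tok_prefix_num d _ (hd ▸ head_dropWhile_noNum xs) (by simp) hall,
        tok_cons, if_pos hx, ht, hd, ih]
    simp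
  | case3 x xs hx ih =>
    rw [List.reverse_cons, tok_append xs.reverse [x] (by simpa [noNumHead] using hx),
        tok_cons, if_neg hx, ih, tok_cons, if_neg hx, tok_nil]
    simp

theorem reverseEqnGo_tok (xs : List Char) :
    reverseEqnGo xs = ((tok xs).map List.reverse).flatten := by
  induction xs using reverseEqnGo.induct with
  | case1 => simp [go_nil, tok_nil]
  | case2 c rest h ih =>
    rw [go_cons, if_pos h, ih, tok_cons, if_pos h]
    simp [h]
  | case3 c rest h ih =>
    rw [go_cons, if_neg h, ih, tok_cons, if_neg h]
    simp

theorem reverseEqn_alt_tok (s : String) :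
    reverseEqn_alt s = String.mk (tok s.toList).reverse.flatten := by
  unfold reverseEqn_alt
  rw [reverseEqnGo_tok, tok_reverse]
  congr 1
  rw [← List.map_reverse, List.map_map]
  simp

-- ===== VERDICT (by name: the statement is the Claim_ definition above) =====
theorem reverseEqn_spec : Claim_equal_reverseEqn := by
  intro s _
  unfold Spec_reverseEqn
  rw [reverseEqn_tok, reverseEqn_alt_tok]
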